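-- pv_equiv track=rewrite | github.com/achalagarwal/Chai | chai/src/Utils/sku_utils.py | separate_meta_data
-- ===== SOURCE A (Python) =====
-- def flipper(flag, option1, option2):
--     if flag == option1:
--         return option2
--     if flag == option2:
--         return option1
--
--     raise(ValueError, "The flag must take either of two values")
--
-- def separate_meta_data(string):
--
--     status = 'ALPHABET'
--     separated_string = ""
--     for char in string:
--         if str(char).isalpha() and status == 'ALPHABET':
--             separated_string += char
--             continue
--         if not str(char).isalpha() and status == 'SPECIAL':
--             separated_string += char
--             continue
--         if (str(char).isalpha() and status == 'SPECIAL') or (not str(char).isalpha() and status == 'ALPHABET'):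
--             separated_string += ' ' + char
--             status = flipper(status, 'SPECIAL', 'ALPHABET')
--             continue
--
--     return separated_string.strip()
-- ===== SOURCE B (Python) =====
-- def separate_meta_data(string):
--     # Split the string into maximal runs of same isalpha() class, then join
--     # the runs with single spaces and strip the result.
--     runs = []
--     chars = list(string)
--     while chars:
--         alpha = chars[0].isalpha()
--         i = 1
--         while i < len(chars) and chars[i].isalpha() == alpha:
--             i += 1
--         runs.append(''.join(chars[:i]))
--         chars = chars[i:]
--     return ' '.join(runs).strip()
-- ===== Notes on version B (the rewrite author's own statement) =====
-- stated objective: idiomatic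
-- what changed: Replaced the ALPHABET/SPECIAL state machine (with its flipper toggle and per-character boundary cases) by a run-splitting pass: cut the string into maximal runs of equal isalpha() class, join the runs with single spaces, and strip.
import Mathlib
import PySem

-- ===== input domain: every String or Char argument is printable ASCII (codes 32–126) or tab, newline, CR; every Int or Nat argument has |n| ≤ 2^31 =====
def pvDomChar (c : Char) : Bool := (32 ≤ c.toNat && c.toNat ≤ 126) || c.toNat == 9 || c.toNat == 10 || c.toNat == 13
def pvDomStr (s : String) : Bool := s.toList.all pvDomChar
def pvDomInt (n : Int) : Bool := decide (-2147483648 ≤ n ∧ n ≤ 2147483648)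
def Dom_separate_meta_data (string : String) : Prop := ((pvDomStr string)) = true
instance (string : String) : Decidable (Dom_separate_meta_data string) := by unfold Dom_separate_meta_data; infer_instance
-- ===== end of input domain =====

-- B replaces A's two-state machine by "split into maximal isalpha-runs, join with ' ', strip" (idiomatic, same cost).

-- ===== PORT A =====
-- Python's flipper: none = the explicit raise (unreachable for the call below, since
-- status is always "ALPHABET" or "SPECIAL"; the port keeps the old status via getD there).
def flipper (flag option1 option2 : String) : Option String :=
  if flag == option1 then some option2
  else if flag == option2 then some option1
  else none

-- the loop body of A, named so the proofs can speak about it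
def pvStepA (st : String × List Char) (char : Char) : String × List Char :=
  if PySem.Chars.isalpha char && st.1 == "ALPHABET" then (st.1, st.2 ++ [char])
  else if !(PySem.Chars.isalpha char) && st.1 == "SPECIAL" then (st.1, st.2 ++ [char])
  else if (PySem.Chars.isalpha char && st.1 == "SPECIAL")
          || (!(PySem.Chars.isalpha char) && st.1 == "ALPHABET") then
    ((flipper st.1 "SPECIAL" "ALPHABET").getD st.1, st.2 ++ [' ', char])
  else st

def separate_meta_data (string : String) : String :=
  let r := string.toList.foldl pvStepA ("ALPHABET", ([] : List Char))
  String.ofList (PySem.Chars.strip r.2)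

-- ===== PORT B =====
-- the while loop of Source B: peel off the maximal run of chars whose isalpha class
-- equals the head's (chars[:i] = c :: takeWhile …, chars = chars[i:] = dropWhile …)
def pvRunsB : List Char → List (List Char)
  | [] => []
  | c :: cs =>
    (c :: cs.takeWhile (fun d => PySem.Chars.isalpha d == PySem.Chars.isalpha c)) ::
      pvRunsB (cs.dropWhile (fun d => PySem.Chars.isalpha d == PySem.Chars.isalpha c))
termination_by l => l.length
decreasing_by exact Nat.lt_succ_of_le (List.length_dropWhile_le _ _)

def separate_meta_data_alt (string : String) : String :=
  String.ofList (PySem.Chars.strip (PySem.Chars.join [' '] (pvRunsB string.toList)))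

-- ===== PRECONDITION & SPEC =====
def Spec_separate_meta_data (string : String) (out : String) : Prop := out = separate_meta_data_alt string
instance (string : String) (out : String) : Decidable (Spec_separate_meta_data string out) := by unfold Spec_separate_meta_data; infer_instance

-- ===== CLAIM (what is proved, stated in full; the proofs are below) =====
def Claim_equal_separate_meta_data : Prop := ∀ (string : String), Dom_separate_meta_data string → Spec_separate_meta_data string (separate_meta_data string)

-- ===== LEMMAS AND PROOFS =====

def pvStatus (b : Bool) : String := if b then "ALPHABET" else "SPECIAL"

lemma pvStepA_eq (b : Bool) (acc : List Char) (c : Char) :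
    pvStepA (pvStatus b, acc) c
      = (pvStatus (PySem.Chars.isalpha c),
         acc ++ (if PySem.Chars.isalpha c == b then [] else [' ']) ++ [c]) := by
  cases b <;> rcases h : PySem.Chars.isalpha c <;>
    simp [pvStepA, flipper, pvStatus, h]

lemma pvRun_fold (k : Bool) :
    ∀ (t acc : List Char), (∀ x ∈ t, PySem.Chars.isalpha x = k) →
      t.foldl pvStepA (pvStatus k, acc) = (pvStatus k, acc ++ t) := by
  intro t
  induction t with
  | nil => simp
  | cons x xs ih =>
    intro acc h
    have hx : PySem.Chars.isalpha x = k := h x (by simp)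
    simp only [List.foldl_cons, pvStepA_eq, hx, beq_self_eq_true, if_true, List.append_nil]
    rw [ih (acc ++ [x]) (fun y hy => h y (by simp [hy]))]
    simp

def pvPre (b : Bool) : List Char → List Char
  | [] => []
  | c :: _ => if PySem.Chars.isalpha c == b then [] else [' ']

lemma pvRunsB_eq_nil_iff (l : List Char) : pvRunsB l = [] ↔ l = [] := by
  cases l <;> simp [pvRunsB]

theorem pvFold_eq (l : List Char) (acc : List Char) (b : Bool) :
    ∃ b', l.foldl pvStepA (pvStatus b, acc)
      = (pvStatus b', acc ++ pvPre b l ++ PySem.Chars.join [' '] (pvRunsB l)) := by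
  match l with
  | [] => exact ⟨b, by simp [pvPre, pvRunsB, PySem.Chars.join_nil]⟩
  | c :: cs =>
    have hcs : cs = cs.takeWhile (fun d => PySem.Chars.isalpha d == PySem.Chars.isalpha c)
        ++ cs.dropWhile (fun d => PySem.Chars.isalpha d == PySem.Chars.isalpha c) :=
      (List.takeWhile_append_dropWhile).symm
    have htk : ∀ x ∈ cs.takeWhile (fun d => PySem.Chars.isalpha d == PySem.Chars.isalpha c),
        PySem.Chars.isalpha x = PySem.Chars.isalpha c := by
      intro x hx
      simpa using List.mem_takeWhile_imp hx
    obtain ⟨b', hb'⟩ := pvFold_eq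
      (cs.dropWhile (fun d => PySem.Chars.isalpha d == PySem.Chars.isalpha c))
      (acc ++ (if PySem.Chars.isalpha c == b then [] else [' ']) ++ [c]
        ++ cs.takeWhile (fun d => PySem.Chars.isalpha d == PySem.Chars.isalpha c))
      (PySem.Chars.isalpha c)
    have hL : List.foldl pvStepA (pvStatus b, acc) (c :: cs)
        = (pvStatus b',
           acc ++ (if PySem.Chars.isalpha c == b then [] else [' ']) ++ [c]
             ++ cs.takeWhile (fun d => PySem.Chars.isalpha d == PySem.Chars.isalpha c)
             ++ pvPre (PySem.Chars.isalpha c)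
                 (cs.dropWhile (fun d => PySem.Chars.isalpha d == PySem.Chars.isalpha c))
             ++ PySem.Chars.join [' ']
                 (pvRunsB (cs.dropWhile (fun d => PySem.Chars.isalpha d == PySem.Chars.isalpha c)))) := by
      rw [List.foldl_cons, pvStepA_eq]
      conv_lhs => rw [hcs]
      rw [List.foldl_append, pvRun_fold _ _ _ htk, hb']
    refine ⟨b', ?_⟩
    rw [hL]
    have hruns : pvRunsB (c :: cs)
        = (c :: cs.takeWhile (fun d => PySem.Chars.isalpha d == PySem.Chars.isalpha c))
            :: pvRunsB (cs.dropWhile (fun d => PySem.Chars.isalpha d == PySem.Chars.isalpha c)) := by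
      simp [pvRunsB]
    rw [hruns]
    rcases hd : cs.dropWhile (fun d => PySem.Chars.isalpha d == PySem.Chars.isalpha c)
      with _ | ⟨h, t⟩
    · simp [pvPre, pvRunsB, PySem.Chars.join_singleton, List.append_assoc]
    · have hph : (PySem.Chars.isalpha h == PySem.Chars.isalpha c) = false := by
        have hne : List.dropWhile (fun d => PySem.Chars.isalpha d == PySem.Chars.isalpha c) cs ≠ [] := by
          simp [hd]
        have h1 := List.head_dropWhile_not
          (fun d => PySem.Chars.isalpha d == PySem.Chars.isalpha c) hne
        have h2 : (List.dropWhile (fun d => PySem.Chars.isalpha d == PySem.Chars.isalpha c) cs).head hne = h := by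
          simp [hd]
        rw [h2] at h1
        simpa using h1
      rcases hr : pvRunsB (h :: t) with _ | ⟨r, rs⟩
      · exact absurd ((pvRunsB_eq_nil_iff _).mp hr) (by simp)
      · rw [PySem.Chars.join_cons_cons]
        simp [pvPre, hph, List.append_assoc]
termination_by l.length
decreasing_by exact Nat.lt_succ_of_le (List.length_dropWhile_le _ _)

lemma pvStrip_space (x : List Char) :
    PySem.Chars.strip (' ' :: x) = PySem.Chars.strip x := by
  simp [PySem.Chars.strip, PySem.Chars.lstrip, PySem.Chars.isspace]

-- ===== VERDICT (by name: the statement is the Claim_ definition above) =====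
theorem separate_meta_data_spec : Claim_equal_separate_meta_data := by
  intro s _
  unfold Spec_separate_meta_data separate_meta_data separate_meta_data_alt
  rw [show ("ALPHABET" : String) = pvStatus true from rfl]
  generalize s.toList = l
  obtain ⟨b', hb'⟩ := pvFold_eq l [] true
  rw [hb']
  rcases l with _ | ⟨c, cs⟩
  · simp [pvPre]
  · by_cases hc : PySem.Chars.isalpha c = true
    · simp [pvPre, hc]
    · simp only [pvPre, List.nil_append]
      rw [if_neg (by simp [hc]), List.singleton_append, pvStrip_space]
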